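-- pv_equiv track=rewrite | github.com/wakkawarpman-oss/hanna-v3-2-clean | src/adapters/hibp_adapter.py | _collect_emails
-- ===== SOURCE A (Python) =====
-- def _collect_emails(target_name: str, known_usernames: list[str]) -> list[str]:
--     candidates = [target_name, *known_usernames]
--     emails: list[str] = []
--     for value in candidates:
--         email = value.strip().lower()
--         if not email or "@" not in email or " " in email:
--             continue
--         emails.append(email)
--     return list(dict.fromkeys(emails))
-- ===== SOURCE B (Python) =====
-- def _collect_emails(target_name: str, known_usernames: list[str]) -> list[str]:
--     def _norm(value: str):
--         email = value.strip().lower()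
--         if email and "@" in email and " " not in email:
--             return email
--         return None
--
--     candidates = [target_name, *known_usernames]
--     pending = [email for email in (_norm(v) for v in candidates) if email is not None]
--     emails: list[str] = []
--     while pending:
--         email = pending[0]
--         emails.append(email)
--         pending = [e for e in pending[1:] if e != email]
--     return emails
-- ===== Notes on version B (the rewrite author's own statement) =====
-- stated objective: alternative
-- what changed: Replaces A's append-loop + dict.fromkeys dedup by head-removal dedup: normalize-and-filter once, then repeatedly take the first pending email and delete all its later occurrences from the pending list - no dict/set is maintained at all.
import Mathlib
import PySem

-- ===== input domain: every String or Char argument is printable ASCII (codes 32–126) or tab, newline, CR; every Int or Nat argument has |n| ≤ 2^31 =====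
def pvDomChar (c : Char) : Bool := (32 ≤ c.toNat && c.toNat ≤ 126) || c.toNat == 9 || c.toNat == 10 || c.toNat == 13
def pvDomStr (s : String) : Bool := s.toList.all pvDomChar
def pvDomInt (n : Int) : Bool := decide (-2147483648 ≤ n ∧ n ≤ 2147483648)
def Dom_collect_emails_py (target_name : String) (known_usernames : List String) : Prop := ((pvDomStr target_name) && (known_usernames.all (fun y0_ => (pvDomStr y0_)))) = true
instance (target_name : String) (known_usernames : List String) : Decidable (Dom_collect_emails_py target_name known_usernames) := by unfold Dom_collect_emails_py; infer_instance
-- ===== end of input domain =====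

-- B replaces A's append-loop + dict.fromkeys by a recursive head-removal dedup (no dict/set kept); alternative decomposition, same results.


-- ===== PORT A =====
def collect_emails_py (target_name : String) (known_usernames : List String) : List String :=
  let candidates := target_name :: known_usernames
  let emails := candidates.foldl (fun emails value =>
    let email := PySem.Str.lower (PySem.Str.strip value)
    if email == "" || !PySem.Str.isIn "@" email || PySem.Str.isIn " " email then emails
    else emails ++ [email]) []
  PySem.List.dedup emails

-- ===== PORT B =====
-- B's helper _norm: the normalized email, or none when invalid
def pvNormB (value : String) : Option String :=
  let email := PySem.Str.lower (PySem.Str.strip value)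
  if email != "" && PySem.Str.isIn "@" email && !PySem.Str.isIn " " email then some email
  else none

-- B's while-loop: head-removal dedup over the pending list; the fuel argument
-- (= the initial pending length, supplied by the caller) only bounds the loop.
def pvGoB : Nat → List String → List String
  | _, [] => []
  | 0, _ :: _ => []
  | n + 1, email :: pending => email :: pvGoB n (pending.filter (fun e => e ≠ email))

def collect_emails_py_alt (target_name : String) (known_usernames : List String) : List String :=
  let candidates := target_name :: known_usernames
  let pending := (candidates.map pvNormB).filterMap (fun e => e)
  pvGoB pending.length pending

-- ===== PRECONDITION & SPEC =====
def Spec_collect_emails_py (target_name : String) (known_usernames : List String) (out : List String) : Prop := out = collect_emails_py_alt target_name known_usernames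
instance (target_name : String) (known_usernames : List String) (out : List String) : Decidable (Spec_collect_emails_py target_name known_usernames out) := by unfold Spec_collect_emails_py; infer_instance

-- ===== CLAIM =====
def Claim_equal_collect_emails_py : Prop := ∀ (target_name : String) (known_usernames : List String), Dom_collect_emails_py target_name known_usernames → Spec_collect_emails_py target_name known_usernames (collect_emails_py target_name known_usernames)

-- ===== LEMMAS AND PROOFS =====

-- A's loop body, named, and the valid-email stream both programs filter out of the input
def pvStepA (acc : List String) (v : String) : List String :=
  let email := PySem.Str.lower (PySem.Str.strip v)
  if email == "" || !PySem.Str.isIn "@" email || PySem.Str.isIn " " email then acc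
  else acc ++ [email]

def pvFlat (l : List String) : List String := l.flatMap (fun v => (pvNormB v).toList)

lemma pvStepA_eq (acc : List String) (v : String) :
    pvStepA acc v = acc ++ (pvNormB v).toList := by
  simp only [pvStepA, pvNormB]
  by_cases h1 : PySem.Str.lower (PySem.Str.strip v) = "" <;>
    cases h2 : PySem.Str.isIn "@" (PySem.Str.lower (PySem.Str.strip v)) <;>
      cases h3 : PySem.Str.isIn " " (PySem.Str.lower (PySem.Str.strip v)) <;>
        simp_all

lemma pvFoldA_eq (l acc : List String) :
    l.foldl pvStepA acc = acc ++ pvFlat l := by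
  induction l generalizing acc with
  | nil => simp [pvFlat]
  | cons v l ih => simp [pvFlat, pvStepA_eq, ih]

-- generic head-removal dedup
def pvGdd {α : Type} [DecidableEq α] : List α → List α
  | [] => []
  | x :: xs => x :: pvGdd (xs.filter (fun y => y ≠ x))
termination_by l => l.length
decreasing_by
  have hb := List.length_filter_le (fun y : {y // y ∈ xs} => decide (↑y ≠ x)) xs.attach
  simp at hb ⊢
  omega

-- folding Set.add = head-removal dedup of the not-yet-seen elements
lemma foldl_add_eq_gdd {α : Type} [DecidableEq α] (n : Nat) :
    ∀ (xs : List α), xs.length ≤ n → ∀ (s : PySem.Set α),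
      xs.foldl PySem.Set.add s = s ++ pvGdd (xs.filter (fun y => y ∉ s)) := by
  induction n with
  | zero =>
    intro xs h s
    have : xs = [] := List.eq_nil_of_length_eq_zero (Nat.le_zero.mp h)
    subst this; simp [pvGdd]
  | succ n ih =>
    intro xs h s
    cases xs with
    | nil => simp [pvGdd]
    | cons x xs =>
      by_cases hx : x ∈ s
      · have hadd : PySem.Set.add s x = s := by simp [PySem.Set.add, hx]
        have hflt : (x :: xs).filter (fun y => y ∉ s) = xs.filter (fun y => y ∉ s) := by
          simp [List.filter, hx]
        rw [List.foldl_cons, hadd, hflt, ih xs (Nat.le_of_succ_le_succ h) s]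
      · have hadd : PySem.Set.add s x = s ++ [x] := by simp [PySem.Set.add, hx]
        have hflt : (x :: xs).filter (fun y => y ∉ s) = x :: xs.filter (fun y => y ∉ s) := by
          simp [List.filter, hx]
        rw [List.foldl_cons, hadd, hflt,
          ih xs (Nat.le_of_succ_le_succ h) (s ++ [x])]
        have hff : xs.filter (fun y => y ∉ s ++ [x])
            = (xs.filter (fun y => y ∉ s)).filter (fun y => y ≠ x) := by
          rw [List.filter_filter]
          apply List.filter_congr
          intro y _
          by_cases h1 : y = x <;> by_cases h2 : y ∈ s <;> simp [h1, h2]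
        rw [hff,
          show pvGdd (x :: xs.filter (fun y => y ∉ s))
              = x :: pvGdd ((xs.filter (fun y => y ∉ s)).filter (fun y => y ≠ x)) from by
            rw [pvGdd]]
        simp

lemma dedup_eq_gdd {α : Type} [DecidableEq α] (xs : List α) :
    PySem.List.dedup xs = pvGdd xs := by
  have h := foldl_add_eq_gdd xs.length xs (le_refl _) ([] : PySem.Set α)
  simp only [List.not_mem_nil, not_false_iff, List.filter_true, List.nil_append,
    decide_true] at h
  rw [PySem.List.dedup_eq_ofList, PySem.Set.ofList_eq_foldl, h]

lemma pvGoB_eq_gdd (n : Nat) : ∀ (l : List String), l.length ≤ n →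
    pvGoB n l = pvGdd l := by
  induction n with
  | zero =>
    intro l h
    have : l = [] := List.eq_nil_of_length_eq_zero (Nat.le_zero.mp h)
    subst this; simp [pvGoB, pvGdd]
  | succ n ih =>
    intro l h
    cases l with
    | nil => simp [pvGoB, pvGdd]
    | cons e es =>
      rw [show pvGoB (n + 1) (e :: es) = e :: pvGoB n (es.filter (fun x => x ≠ e)) from rfl]
      rw [ih _ (le_trans (List.length_filter_le _ _) (Nat.le_of_succ_le_succ h)), pvGdd]

lemma map_filterMap_eq_pvFlat (l : List String) :
    (l.map pvNormB).filterMap (fun e => e) = pvFlat l := by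
  induction l with
  | nil => simp [pvFlat]
  | cons v vs ih =>
    cases hv : pvNormB v with
    | none =>
      rw [List.map_cons, List.filterMap_cons_none (by simpa using hv)]
      rw [show pvFlat (v :: vs) = pvFlat vs from by
        simp only [pvFlat, List.flatMap_cons, hv, Option.toList_none, List.nil_append]]
      exact ih
    | some e =>
      rw [List.map_cons, List.filterMap_cons_some (by simpa using hv)]
      rw [show pvFlat (v :: vs) = e :: pvFlat vs from by
        simp only [pvFlat, List.flatMap_cons, hv, Option.toList_some, List.singleton_append]]
      rw [ih]

-- ===== VERDICT =====
theorem collect_emails_py_spec : Claim_equal_collect_emails_py := by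
  intro t ks _
  show PySem.List.dedup ((t :: ks).foldl pvStepA []) = collect_emails_py_alt t ks
  show PySem.List.dedup ((t :: ks).foldl pvStepA [])
      = pvGoB (((t :: ks).map pvNormB).filterMap (fun e => e)).length
          (((t :: ks).map pvNormB).filterMap (fun e => e))
  rw [pvFoldA_eq, List.nil_append, dedup_eq_gdd, map_filterMap_eq_pvFlat,
    pvGoB_eq_gdd _ _ (le_refl _)]
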